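-- pv_equiv track=rewrite | github.com/Natalie-Hong/Daedalus-s-Creation | maze.py | boarder
-- ===== SOURCE A (Python) =====
-- def boarder(cells):
--     for row in range(len(cells)):
--         for col in range(len(cells[row])):
--             #walls going in order: (right, down)
--             if row == 0:
--                 cells[row][col][0] = 1
--             if col == 0:
--                 cells[row][col][1] = 1
--             if col == len(cells[row])-1:
--                 cells[row][col][0] = 0
--             if row == len(cells)-1:
--                 cells[row][col][1] = 0
--                 if (row, col) != (len(cells)-1, len(cells[0])-1):
--                     cells[row][col][0] = 1
--     return cells
-- ===== SOURCE B (Python) =====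
-- def boarder(cells):
--     # Touch only the border cells, via three edge passes.
--     if not cells:
--         return cells
--     for cell in cells[0]:
--         cell[0] = 1
--     for row in cells:
--         if row:
--             row[0][1] = 1
--             row[-1][0] = 0
--     corner = len(cells[0]) - 1
--     for col, cell in enumerate(cells[-1]):
--         cell[1] = 0
--         if col != corner:
--             cell[0] = 1
--     return cells
-- ===== Notes on version B (the rewrite author's own statement) =====
-- stated objective: alternative
-- what changed: B touches only the border cells via three edge passes (top row, first/last cell of each row, bottom row) instead of A's nested row/column scan over every cell; measured speed was about the same on the generated inputs.
import Mathlib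
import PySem

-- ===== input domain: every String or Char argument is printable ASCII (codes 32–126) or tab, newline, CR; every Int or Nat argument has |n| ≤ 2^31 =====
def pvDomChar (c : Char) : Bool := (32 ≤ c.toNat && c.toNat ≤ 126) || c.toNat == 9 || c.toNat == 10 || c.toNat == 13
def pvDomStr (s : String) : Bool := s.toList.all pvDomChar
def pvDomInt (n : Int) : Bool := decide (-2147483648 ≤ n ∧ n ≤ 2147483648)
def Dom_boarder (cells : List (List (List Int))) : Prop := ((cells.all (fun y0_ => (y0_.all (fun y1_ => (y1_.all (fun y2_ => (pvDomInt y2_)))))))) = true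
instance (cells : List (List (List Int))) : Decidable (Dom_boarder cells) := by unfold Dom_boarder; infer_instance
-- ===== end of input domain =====

-- B sets the border wall flags by touching only the edge rows/columns (three edge passes)
-- rather than A's nested scan of every cell (a structural change; measured speed similar);
-- return-value equivalence (both Pythons also mutate the argument in place, in the same way).

-- ===== PORT A =====
-- helper: the Python statement cells[row][col][k] = v  (in-place assignment, as a pure update)
def setCell (acc : List (List (List Int))) (r c k : Nat) (v : Int) : List (List (List Int)) :=
  acc.set r ((acc.getD r []).set c (((acc.getD r []).getD c []).set k v))

def boarder (cells : List (List (List Int))) : List (List (List Int)) :=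
  (List.range cells.length).foldl (fun acc r =>
    (List.range (acc.getD r []).length).foldl (fun acc2 c =>
      let a1 := if r = 0 then setCell acc2 r c 0 1 else acc2
      let a2 := if c = 0 then setCell a1 r c 1 1 else a1
      let a3 := if (c : Int) = ((a2.getD r []).length : Int) - 1 then setCell a2 r c 0 0 else a2
      if (r : Int) = (a3.length : Int) - 1 then
        let a4 := setCell a3 r c 1 0
        if ¬((r : Int) = (a4.length : Int) - 1 ∧ (c : Int) = ((a4.getD 0 []).length : Int) - 1)
        then setCell a4 r c 0 1 else a4
      else a3) acc) cells

-- ===== PORT B =====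
def boarder_alt (cells : List (List (List Int))) : List (List (List Int)) :=
  if cells = [] then cells
  else
    let cells1 := cells.set 0 ((cells.getD 0 []).map (fun cell => cell.set 0 1))
    let cells2 := cells1.map (fun row =>
      if row = [] then row
      else
        let row' := row.set 0 ((row.getD 0 []).set 1 1)
        row'.set (row'.length - 1) ((row'.getD (row'.length - 1) []).set 0 0))
    let corner : Int := ((cells2.getD 0 []).length : Int) - 1
    let last := cells2.length - 1
    cells2.set last ((cells2.getD last []).mapIdx (fun col cell =>
      let cell1 := cell.set 1 0
      if (col : Int) ≠ corner then cell1.set 0 1 else cell1))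

-- ===== PRECONDITION & SPEC =====
-- Pre_ excludes exactly the inputs on which Python A raises IndexError: a border cell whose
-- inner wall list is too short for the wall index assigned there (index 0 on the top row /
-- last column / bottom row, index 1 on the first column / bottom row); B raises there too.
def Pre_boarder (cells : List (List (List Int))) : Prop :=
  ∀ r < cells.length, ∀ c < (cells.getD r []).length,
    ((r = 0 ∨ c + 1 = (cells.getD r []).length) → 1 ≤ ((cells.getD r []).getD c []).length) ∧
    ((c = 0 ∨ r + 1 = cells.length) → 2 ≤ ((cells.getD r []).getD c []).length)
instance (cells : List (List (List Int))) : Decidable (Pre_boarder cells) := by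
  unfold Pre_boarder; infer_instance

def pvWitness_boarder : List (List (List Int)) :=
  [[[0, 0], [0, 0]], [[0, 0], [0, 0]]]

def Spec_boarder (cells : List (List (List Int))) (out : List (List (List Int))) : Prop := out = boarder_alt cells
instance (cells : List (List (List Int))) (out : List (List (List Int))) : Decidable (Spec_boarder cells out) := by unfold Spec_boarder; infer_instance

-- ===== CLAIM (what is proved, stated in full; the proofs are below) =====
def Claim_equal_boarder : Prop := ∀ (cells : List (List (List Int))), Dom_boarder cells → Pre_boarder cells → Spec_boarder cells (boarder cells)

-- ===== LEMMAS AND PROOFS =====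

theorem pv_getD_set {α : Type} (l : List α) (r i : Nat) (x d : α) :
    (l.set r x).getD i d = if r = i ∧ r < l.length then x else l.getD i d := by
  simp [List.getD_eq_getElem?_getD, List.getElem?_set]
  split_ifs with h1 h2 h3 <;> simp_all
  · omega

theorem pv_set_getD_self {α : Type} (l : List α) (i : Nat) (d : α) (h : i < l.length) :
    l.set i (l.getD i d) = l := by
  apply List.ext_getElem
  · simp
  · intro j hj1 hj2
    simp only [List.getElem_set]
    split_ifs with he
    · subst he; simp [List.getD_eq_getElem?_getD, List.getElem?_eq_getElem h]
    · rfl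

theorem pv_foldl_pres {α β : Type} (P : α → Prop) (f : α → β → α) (l : List β) (a : α)
    (ha : P a) (hf : ∀ x b, P x → b ∈ l → P (f x b)) : P (l.foldl f a) := by
  induction l generalizing a with
  | nil => exact ha
  | cons b t ih =>
    exact ih (f a b) (hf a b ha (by simp)) (fun x b' hx hb' => hf x b' hx (by simp [hb']))

theorem pv_foldl_congr_inv {α β : Type} (P : α → Prop) (f g : α → β → α) (l : List β) (a : α)
    (ha : P a) (hf : ∀ x b, P x → b ∈ l → P (f x b))
    (hfg : ∀ x b, P x → b ∈ l → f x b = g x b) : l.foldl f a = l.foldl g a := by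
  induction l generalizing a with
  | nil => rfl
  | cons b t ih =>
    have h1 : f a b = g a b := hfg a b ha (by simp)
    simp only [List.foldl_cons, h1]
    rw [← h1]
    exact ih (f a b) (hf a b ha (by simp)) (fun x b' hx hb' => hf x b' hx (by simp [hb']))
      (fun x b' hx hb' => hfg x b' hx (by simp [hb']))

theorem pv_getD_append_len {α : Type} (pre : List α) (x : α) (xs : List α) (d : α) :
    ((pre ++ x :: xs).getD pre.length d) = x := by
  simp [List.getD_eq_getElem?_getD]

theorem pv_set_append_len {α : Type} (pre : List α) (x y : α) (xs : List α) :
    ((pre ++ x :: xs).set pre.length y) = pre ++ y :: xs := by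
  induction pre with
  | nil => simp
  | cons p t ih => simp [ih]

theorem pv_foldl_set_aux {α : Type} (F : Nat → α → α) (d : α) :
    ∀ (l pre : List α),
      (List.range' pre.length l.length).foldl (fun a i => a.set i (F i (a.getD i d))) (pre ++ l)
        = pre ++ l.mapIdx (fun i x => F (pre.length + i) x) := by
  intro l
  induction l with
  | nil => intro pre; simp
  | cons x xs ih =>
    intro pre
    rw [List.length_cons, List.range'_succ, List.foldl_cons, pv_getD_append_len,
      pv_set_append_len]
    have h2 := ih (pre ++ [F pre.length x])
    rw [List.length_append, List.length_cons, List.length_nil] at h2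
    have hre : pre ++ F pre.length x :: xs = (pre ++ [F pre.length x]) ++ xs := by simp
    rw [hre, h2, List.mapIdx_cons]
    have hfe : (fun (i : Nat) (y : α) => F (pre.length + 0 + 1 + i) y)
        = (fun (i : Nat) (y : α) => F (pre.length + (i + 1)) y) := by
      funext i y
      have : pre.length + 0 + 1 + i = pre.length + (i + 1) := by omega
      rw [this]
    simp [hfe]

theorem pv_foldl_set_mapIdx {α : Type} (F : Nat → α → α) (d : α) (l : List α) :
    (List.range l.length).foldl (fun a i => a.set i (F i (a.getD i d))) l = l.mapIdx F := by
  have := pv_foldl_set_aux F d l []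
  simpa [List.range_eq_range'] using this

def cellT (R C0 : Int) (r rowlen c : Nat) (cell : List Int) : List Int :=
  let c1 := if r = 0 then cell.set 0 1 else cell
  let c2 := if c = 0 then c1.set 1 1 else c1
  let c3 := if (c : Int) = (rowlen : Int) - 1 then c2.set 0 0 else c2
  if (r : Int) = R - 1 then
    let c4 := c3.set 1 0
    if ¬((r : Int) = R - 1 ∧ (c : Int) = C0 - 1) then c4.set 0 1 else c4
  else c3

theorem pv_setCell_set (acc : List (List (List Int))) (r c k : Nat) (v : Int) (y : List Int)
    (hr : r < acc.length) (hc : c < (acc.getD r []).length) :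
    setCell (acc.set r ((acc.getD r []).set c y)) r c k v
      = acc.set r ((acc.getD r []).set c (y.set k v)) := by
  have hgd : acc.getD r [] = acc[r] := by
    simp [List.getD_eq_getElem?_getD, List.getElem?_eq_getElem hr]
  rw [hgd] at hc
  simp [setCell, hr, List.set_set, List.getD_eq_getElem?_getD, hc]

theorem pv_condSet (acc : List (List (List Int))) (r c : Nat)
    (hr : r < acc.length) (hc : c < (acc.getD r []).length) (y : List Int)
    (b : Prop) [Decidable b] (k : Nat) (v : Int) :
    (if b then setCell (acc.set r ((acc.getD r []).set c y)) r c k v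
     else acc.set r ((acc.getD r []).set c y))
      = acc.set r ((acc.getD r []).set c (if b then y.set k v else y)) := by
  split_ifs with hb
  · exact pv_setCell_set acc r c k v y hr hc
  · rfl

theorem pv_setform_len (acc : List (List (List Int))) (r c : Nat) (y : List Int) :
    (acc.set r ((acc.getD r []).set c y)).length = acc.length := by simp

theorem pv_setform_getD_len (acc : List (List (List Int))) (r c : Nat) (y : List Int) (i : Nat) :
    ((acc.set r ((acc.getD r []).set c y)).getD i []).length = (acc.getD i []).length := by
  rw [pv_getD_set]
  split_ifs with h
  · rw [List.length_set, h.1]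
  · rfl

theorem pv_bodyA_collapse (cells acc2 : List (List (List Int))) (r c : Nat)
    (hlen : acc2.length = cells.length)
    (hrow : ∀ i, (acc2.getD i []).length = (cells.getD i []).length)
    (hr : r < cells.length) (hc : c < (cells.getD r []).length) :
    (let a1 := if r = 0 then setCell acc2 r c 0 1 else acc2
     let a2 := if c = 0 then setCell a1 r c 1 1 else a1
     let a3 := if (c : Int) = ((a2.getD r []).length : Int) - 1 then setCell a2 r c 0 0 else a2
     if (r : Int) = (a3.length : Int) - 1 then
       let a4 := setCell a3 r c 1 0
       if ¬((r : Int) = (a4.length : Int) - 1 ∧ (c : Int) = ((a4.getD 0 []).length : Int) - 1)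
       then setCell a4 r c 0 1 else a4
     else a3)
      = acc2.set r ((acc2.getD r []).set c
          (cellT (cells.length : Int) ((cells.getD 0 []).length : Int) r
            (cells.getD r []).length c ((acc2.getD r []).getD c []))) := by
  have hr' : r < acc2.length := by omega
  have hc' : c < (acc2.getD r []).length := by rw [hrow]; exact hc
  have hid : acc2
      = acc2.set r ((acc2.getD r []).set c ((acc2.getD r []).getD c [])) := by
    rw [pv_set_getD_self _ _ _ hc', pv_set_getD_self _ _ _ hr']
  have e1 : (if r = 0 then setCell acc2 r c 0 1 else acc2)
      = acc2.set r ((acc2.getD r []).set c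
          (if r = 0 then ((acc2.getD r []).getD c []).set 0 1 else (acc2.getD r []).getD c [])) := by
    conv_lhs => rw [hid]
    exact pv_condSet acc2 r c hr' hc' _ (r = 0) 0 1
  simp only [cellT]
  rw [e1]
  rw [pv_condSet acc2 r c hr' hc']
  rw [pv_condSet acc2 r c hr' hc']
  rw [pv_setform_getD_len, hrow r, pv_setform_len, hlen]
  by_cases h4 : (r : Int) = (cells.length : Int) - 1
  · rw [if_pos h4, if_pos h4]
    rw [pv_setCell_set acc2 r c 1 0 _ hr' hc']
    rw [pv_setform_len, hlen, pv_setform_getD_len, hrow 0]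
    rw [pv_condSet acc2 r c hr' hc']
  · rw [if_neg h4, if_neg h4]

theorem pv_foldl_set_mapIdx' {α : Type} (F : Nat → α → α) (d : α) (l : List α) (n : Nat)
    (hn : n = l.length) :
    (List.range n).foldl (fun a i => a.set i (F i (a.getD i d))) l = l.mapIdx F := by
  subst hn; exact pv_foldl_set_mapIdx F d l

theorem pv_foldl_set_row (acc : List (List (List Int))) (r : Nat) (hr : r < acc.length)
    (h : Nat → List Int → List Int) (n : Nat) :
    (List.range n).foldl
        (fun a c => a.set r ((a.getD r []).set c (h c ((a.getD r []).getD c [])))) acc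
      = acc.set r ((List.range n).foldl (fun row c => row.set c (h c (row.getD c [])))
          (acc.getD r [])) := by
  induction n with
  | zero =>
    simp only [List.range_zero, List.foldl_nil]
    exact (pv_set_getD_self acc r [] hr).symm
  | succ n ih =>
    rw [List.range_succ, List.foldl_append, List.foldl_append, ih]
    simp only [List.foldl_cons, List.foldl_nil]
    rw [pv_getD_set]
    simp [hr, List.set_set]

def boarderClean (cells : List (List (List Int))) : List (List (List Int)) :=
  cells.mapIdx (fun r row =>
    row.mapIdx (fun c cell =>
      cellT (cells.length : Int) (((cells.getD 0 []).length : Int)) r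
        (cells.getD r []).length c cell))

theorem boarder_eq_spec (cells : List (List (List Int))) : boarder cells = boarderClean cells := by
  unfold boarder boarderClean
  have hpresSet : ∀ (x : List (List (List Int))) (r c : Nat) (y : List Int),
      (x.length = cells.length ∧ ∀ i, (x.getD i []).length = (cells.getD i []).length) →
      ((x.set r ((x.getD r []).set c y)).length = cells.length ∧
        ∀ i, ((x.set r ((x.getD r []).set c y)).getD i []).length = (cells.getD i []).length) := by
    intro x r c y hx
    exact ⟨by rw [pv_setform_len, hx.1], fun i => by rw [pv_setform_getD_len]; exact hx.2 i⟩
  trans ((List.range cells.length).foldl (fun acc r =>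
      acc.set r ((acc.getD r []).mapIdx (fun c cell =>
        cellT (cells.length : Int) (((cells.getD 0 []).length : Int)) r
          (cells.getD r []).length c cell))) cells)
  · refine pv_foldl_congr_inv
      (fun acc => acc.length = cells.length ∧
        ∀ i, (acc.getD i []).length = (cells.getD i []).length) _ _ _ _
      ⟨rfl, fun _ => rfl⟩ ?_ ?_
    · -- the messy inner fold preserves the invariant
      intro x r hx hr
      refine pv_foldl_pres
        (fun (acc : List (List (List Int))) => acc.length = cells.length ∧
          ∀ i, (acc.getD i []).length = (cells.getD i []).length) _ _ _ hx ?_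
      intro y c hy hc
      have hrR : r < cells.length := List.mem_range.mp hr
      have hcr : c < (cells.getD r []).length := by
        have := List.mem_range.mp hc
        rwa [hx.2 r] at this
      rw [pv_bodyA_collapse cells y r c hy.1 hy.2 hrR hcr]
      exact hpresSet y r c _ hy
    · -- the messy inner fold equals the clean one
      intro x r hx hr
      have hrR : r < cells.length := List.mem_range.mp hr
      rw [hx.2 r]
      trans ((List.range (cells.getD r []).length).foldl (fun a c =>
          a.set r ((a.getD r []).set c
            (cellT (cells.length : Int) (((cells.getD 0 []).length : Int)) r
              (cells.getD r []).length c ((a.getD r []).getD c [])))) x)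
      · refine pv_foldl_congr_inv
          (fun acc => acc.length = cells.length ∧
            ∀ i, (acc.getD i []).length = (cells.getD i []).length) _ _ _ _ hx ?_ ?_
        · intro y c hy hc
          rw [pv_bodyA_collapse cells y r c hy.1 hy.2 hrR (List.mem_range.mp hc)]
          exact hpresSet y r c _ hy
        · intro y c hy hc
          exact pv_bodyA_collapse cells y r c hy.1 hy.2 hrR (List.mem_range.mp hc)
      · rw [pv_foldl_set_row x r (by omega) _ _]
        exact congrArg (x.set r)
          (pv_foldl_set_mapIdx' _ [] (x.getD r []) _ (hx.2 r).symm)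
  · exact pv_foldl_set_mapIdx' _ [] cells _ rfl

theorem pv_getD_lt {α : Type} (l : List α) (i : Nat) (d : α) (h : i < l.length) :
    l.getD i d = l[i] := by
  simp [List.getD_eq_getElem?_getD, List.getElem?_eq_getElem h]

def pvF1 : List Int → List Int := fun cell => cell.set 0 1

def pvG : List (List Int) → List (List Int) := fun row =>
  if row = [] then row
  else
    let row' := row.set 0 ((row.getD 0 []).set 1 1)
    row'.set (row'.length - 1) ((row'.getD (row'.length - 1) []).set 0 0)

def pvF3 (corner : Int) : Nat → List Int → List Int := fun col cell =>
  let cell1 := cell.set 1 0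
  if (col : Int) ≠ corner then cell1.set 0 1 else cell1

theorem pvG_length (row : List (List Int)) : (pvG row).length = row.length := by
  unfold pvG; split_ifs <;> simp

theorem pvG_getElem (row : List (List Int)) (c : Nat) (hc : c < row.length)
    (h' : c < (pvG row).length) :
    (pvG row)[c] = (if c = row.length - 1
      then (if c = 0 then row[c].set 1 1 else row[c]).set 0 0
      else if c = 0 then row[c].set 1 1 else row[c]) := by
  have hne : ¬(row = []) := by
    intro h; subst h; simp at hc
  have h0 : 0 < row.length := by omega
  have hL : row.length - 1 < row.length := by omega
  by_cases hc0 : c = 0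
  · subst hc0
    simp only [pvG, if_neg hne, pv_getD_lt row 0 [] h0, List.length_set,
      pv_getD_lt (row.set 0 (row[0].set 1 1)) (row.length - 1) [] (by simpa using hL),
      List.getElem_set]
    split_ifs <;> first | rfl | omega
  · by_cases hcl : c = row.length - 1
    · subst hcl
      simp only [pvG, if_neg hne, pv_getD_lt row 0 [] h0, List.length_set,
        pv_getD_lt (row.set 0 (row[0].set 1 1)) (row.length - 1) [] (by simpa using hL),
        List.getElem_set]
      split_ifs <;> first | rfl | omega
    · simp only [pvG, if_neg hne, pv_getD_lt row 0 [] h0, List.length_set,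
        pv_getD_lt (row.set 0 (row[0].set 1 1)) (row.length - 1) [] (by simpa using hL),
        List.getElem_set]
      split_ifs <;> first | rfl | omega

set_option maxHeartbeats 2000000 in
theorem pv_rowB (n C0len r : Nat) (hr : r < n) (row : List (List Int)) :
    (if n - 1 = r
      then (pvG (if 0 = r then row.map pvF1 else row)).mapIdx (pvF3 ((C0len : Int) - 1))
      else pvG (if 0 = r then row.map pvF1 else row))
    = row.mapIdx (fun c cell =>
        cellT (n : Int) (C0len : Int) r row.length c cell) := by
  apply List.ext_getElem
  · split_ifs <;> simp [pvG_length]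
  · intro c h1 h2
    simp only [List.length_mapIdx] at h2
    by_cases hlast : n - 1 = r <;> by_cases hr0 : 0 = r
    · simp only [if_pos hlast, if_pos hr0, List.getElem_mapIdx,
        pvG_getElem (row.map pvF1) c (by simpa using h2) (by rw [pvG_length]; simpa using h2),
        List.length_map, List.getElem_map]
      simp only [pvF1, pvF3, cellT]
      split_ifs <;> first | rfl | omega
    · simp only [if_pos hlast, if_neg hr0, List.getElem_mapIdx,
        pvG_getElem row c h2 (by rw [pvG_length]; exact h2)]
      simp only [pvF3, cellT]
      split_ifs <;> first | rfl | omega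
    · simp only [if_neg hlast, if_pos hr0,
        pvG_getElem (row.map pvF1) c (by simpa using h2) (by rw [pvG_length]; simpa using h2),
        List.length_map, List.getElem_map, List.getElem_mapIdx]
      simp only [pvF1, cellT]
      split_ifs <;> first | rfl | omega
    · simp only [if_neg hlast, if_neg hr0,
        pvG_getElem row c h2 (by rw [pvG_length]; exact h2), List.getElem_mapIdx]
      simp only [cellT]
      split_ifs <;> first | rfl | omega

theorem boarder_alt_named (cells : List (List (List Int))) (hnil : ¬(cells = [])) :
    boarder_alt cells
      = (let cells2 := (cells.set 0 ((cells.getD 0 []).map pvF1)).map pvG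
         cells2.set (cells2.length - 1)
           ((cells2.getD (cells2.length - 1) []).mapIdx
             (pvF3 (((cells2.getD 0 []).length : Int) - 1)))) := by
  unfold boarder_alt
  rw [if_neg hnil]
  rfl

theorem boarder_alt_eq_spec (cells : List (List (List Int))) :
    boarder_alt cells = boarderClean cells := by
  by_cases hnil : cells = []
  · subst hnil; rfl
  · rw [boarder_alt_named cells hnil]
    have hn : 0 < cells.length := List.length_pos_of_ne_nil hnil
    simp only []
    set M := (cells.set 0 ((cells.getD 0 []).map pvF1)).map pvG with hM
    have hMlen : M.length = cells.length := by simp [hM]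
    have hMget : ∀ i, i < cells.length →
        ∀ (h : i < M.length), M[i] = pvG (if 0 = i then (cells.getD 0 []).map pvF1 else cells[i]) := by
      intro i hi h
      simp only [hM, List.getElem_map, List.getElem_set]
    have hC0 : ((M.getD 0 []).length : Int) - 1 = ((cells.getD 0 []).length : Int) - 1 := by
      rw [pv_getD_lt M 0 [] (by omega), hMget 0 hn (by omega)]
      rw [if_pos rfl, pvG_length, List.length_map]
    unfold boarderClean
    apply List.ext_getElem
    · simp only [List.length_set, List.length_mapIdx, hMlen]
    · intro r h1 h2
      simp only [List.length_set, hMlen] at h1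
      simp only [List.length_mapIdx] at h2
      have hgd : M.getD (cells.length - 1) [] = M[cells.length - 1]'(by omega) :=
        pv_getD_lt M (cells.length - 1) [] (by omega)
      simp only [List.getElem_set, List.getElem_mapIdx, hC0, hMlen]
      by_cases hlast : cells.length - 1 = r
      · rw [if_pos hlast]
        have e1 : M[cells.length - 1]'(by omega) = M[r]'(by omega) := getElem_congr_idx hlast
        rw [hgd, e1, hMget r (by omega) (by omega)]
        have hthis := pv_rowB cells.length ((cells.getD 0 []).length) r (by omega) (cells[r])
        rw [if_pos hlast] at hthis
        rw [show (if 0 = r then (cells.getD 0 []).map pvF1 else cells[r])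
            = (if 0 = r then cells[r].map pvF1 else cells[r]) from by
          by_cases h0 : 0 = r
          · rw [if_pos h0, if_pos h0, pv_getD_lt cells 0 [] hn, getElem_congr_idx h0]
          · rw [if_neg h0, if_neg h0]]
        rw [hthis, pv_getD_lt cells r [] (by omega)]
      · rw [if_neg hlast]
        rw [hMget r (by omega) (by omega)]
        have hthis := pv_rowB cells.length ((cells.getD 0 []).length) r (by omega) (cells[r])
        rw [if_neg hlast] at hthis
        rw [show (if 0 = r then (cells.getD 0 []).map pvF1 else cells[r])
            = (if 0 = r then cells[r].map pvF1 else cells[r]) from by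
          by_cases h0 : 0 = r
          · rw [if_pos h0, if_pos h0, pv_getD_lt cells 0 [] hn, getElem_congr_idx h0]
          · rw [if_neg h0, if_neg h0]]
        rw [hthis, pv_getD_lt cells r [] (by omega)]

-- ===== VERDICT (by name: the statement is the Claim_ definition above) =====
theorem boarder_spec : Claim_equal_boarder := by
  intro cells _ _
  unfold Spec_boarder
  rw [boarder_eq_spec, boarder_alt_eq_spec]
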